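-- pv_equiv track=rewrite | github.com/bropony/simplingua | backend/app/api/phonetics.py | determine_stress_pattern
-- ===== SOURCE A (Python) =====
-- from typing import List
--
-- def split_into_syllables(word: str) -> List[str]:
--     """Split word into syllables"""
--     # Simplified syllable division
--     # In production, use proper linguistic rules
--     vowels = "aeiouáéíóú"
--     syllables = []
--     current = ""
--
--     for char in word:
--         current += char
--         if char.lower() in vowels:
--             syllables.append(current)
--             current = ""
--
--     if current:
--         syllables.append(current)
--
--     return syllables
--
-- def determine_stress_pattern(word: str) -> str:
--     """Determine stress pattern for word"""
--     # Count syllables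
--     syllable_count = len(split_into_syllables(word))
--
--     # Exceptions: -ia, -io, -ie, -ion, -ua, -ue, -uo
--     exceptions = ["ia", "io", "ie", "ion", "ua", "ue", "uo"]
--     for exc in exceptions:
--         if word.lower().endswith(exc):
--             if syllable_count >= 3:
--                 return "antepenultimate"
--             break
--
--     if syllable_count == 1:
--         return "monosyllabic"
--     elif syllable_count == 2:
--         return "penultimate"
--     else:
--         return "penultimate"
-- ===== SOURCE B (Python) =====
-- VOWELS = "aeiouáéíóú"
--
-- def determine_stress_pattern(word: str) -> str:
--     """Determine stress pattern for word (direct count, no syllable list)."""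
--     w = word.lower()
--     count = sum(1 for c in w if c in VOWELS)
--     if w and w[-1] not in VOWELS:
--         count += 1
--     if count >= 3 and any(w.endswith(e) for e in ("ia", "io", "ie", "ion", "ua", "ue", "uo")):
--         return "antepenultimate"
--     return "monosyllabic" if count == 1 else "penultimate"
-- ===== Notes on version B (the rewrite author's own statement) =====
-- stated objective: simpler
-- what changed: B drops the syllable-list helper entirely: it counts vowel characters arithmetically (plus one for a trailing non-vowel) and classifies with a single conditional, instead of building a list of syllable substrings, taking its length, and scanning suffixes with a break-driven loop.
import Mathlib
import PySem

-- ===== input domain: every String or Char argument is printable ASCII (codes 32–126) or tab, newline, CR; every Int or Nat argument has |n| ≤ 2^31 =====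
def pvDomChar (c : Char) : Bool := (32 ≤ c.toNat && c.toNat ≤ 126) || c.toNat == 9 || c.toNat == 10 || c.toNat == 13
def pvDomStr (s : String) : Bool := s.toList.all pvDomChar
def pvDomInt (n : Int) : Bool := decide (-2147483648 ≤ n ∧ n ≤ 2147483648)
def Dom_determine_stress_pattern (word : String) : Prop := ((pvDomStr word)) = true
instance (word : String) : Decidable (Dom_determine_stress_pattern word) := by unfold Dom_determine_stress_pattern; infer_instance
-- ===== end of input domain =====

-- B replaces A's syllable-list helper by a direct vowel count plus a single conditional (objective: simpler).

-- ===== PORT A =====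
def pvVowels : List Char := "aeiouáéíóú".toList

-- one step of the 'for char in word' loop of split_into_syllables (state: syllables, current)
def pvSplitStep (st : List (List Char) × List Char) (c : Char) : List (List Char) × List Char :=
  let cur := st.2 ++ [c]
  if PySem.Chars.lowerChar c ∈ pvVowels then (st.1 ++ [cur], []) else (st.1, cur)

def split_into_syllables (word : String) : List String :=
  let r := word.toList.foldl pvSplitStep ([], [])
  let sylls := if r.2 ≠ [] then r.1 ++ [r.2] else r.1
  sylls.map (fun cs => String.mk cs)

-- 'if syllable_count == 1 … elif == 2 … else …' tail reached after the loop breaks or finds no match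
def pvClassifyA (n : Nat) : String :=
  if n == 1 then "monosyllabic" else if n == 2 then "penultimate" else "penultimate"

def determine_stress_pattern (word : String) : String :=
  let syllable_count := (split_into_syllables word).length
  let exceptions : List String := ["ia", "io", "ie", "ion", "ua", "ue", "uo"]
  -- the 'for exc in exceptions: if endswith: (return if ≥3) ; break' loop = first matching suffix
  match exceptions.find? (fun e => PySem.Str.endswith (PySem.Str.lower word) e) with
  | some _ => if 3 ≤ syllable_count then "antepenultimate" else pvClassifyA syllable_count
  | none => pvClassifyA syllable_count

-- ===== PORT B =====
def determine_stress_pattern_alt (word : String) : String :=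
  let w := PySem.Str.lower word
  let count0 := w.toList.countP (fun c => c ∈ pvVowels)
  let count := match w.toList.getLast? with
    | some c => if c ∈ pvVowels then count0 else count0 + 1
    | none => count0
  if 3 ≤ count ∧
      (["ia", "io", "ie", "ion", "ua", "ue", "uo"].any
        (fun e => PySem.Str.endswith w e)) = true then
    "antepenultimate"
  else if count == 1 then "monosyllabic" else "penultimate"

-- ===== PRECONDITION & SPEC =====
def Spec_determine_stress_pattern (word : String) (out : String) : Prop := out = determine_stress_pattern_alt word
instance (word : String) (out : String) : Decidable (Spec_determine_stress_pattern word out) := by unfold Spec_determine_stress_pattern; infer_instance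

-- ===== CLAIM (what is proved, stated in full; the proofs are below) =====
def Claim_equal_determine_stress_pattern : Prop := ∀ (word : String), Dom_determine_stress_pattern word → Spec_determine_stress_pattern word (determine_stress_pattern word)

-- ===== LEMMAS AND PROOFS =====

-- the first component of the loop state grows by one list per vowel character
theorem pvSplit_fst_len (cs : List Char) : ∀ (s : List (List Char)) (c : List Char),
    (cs.foldl pvSplitStep (s, c)).1.length
      = s.length + cs.countP (fun d => PySem.Chars.lowerChar d ∈ pvVowels) := by
  induction cs with
  | nil => intro s c; simp
  | cons d cs ih =>
    intro s c
    simp only [List.foldl_cons, List.countP_cons, pvSplitStep]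
    by_cases h : PySem.Chars.lowerChar d ∈ pvVowels <;> simp [h, ih] <;> omega

-- after at least one character, 'current' is empty iff the last character is a vowel
theorem pvSplit_snd_snoc (cs : List Char) (d : Char) (s : List (List Char)) (c : List Char) :
    (((cs ++ [d]).foldl pvSplitStep (s, c)).2 = []
      ↔ PySem.Chars.lowerChar d ∈ pvVowels) := by
  rw [List.foldl_append]
  simp only [List.foldl_cons, List.foldl_nil, pvSplitStep]
  by_cases h : PySem.Chars.lowerChar d ∈ pvVowels <;> simp [h]

-- A's syllable count equals B's count
theorem pvCount_eq (word : String) :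
    (split_into_syllables word).length
      = (match (PySem.Str.lower word).toList.getLast? with
         | some c => if c ∈ pvVowels
             then (PySem.Str.lower word).toList.countP (fun c => c ∈ pvVowels)
             else (PySem.Str.lower word).toList.countP (fun c => c ∈ pvVowels) + 1
         | none => (PySem.Str.lower word).toList.countP (fun c => c ∈ pvVowels)) := by
  simp only [split_into_syllables, PySem.Str.toList_lower, PySem.Chars.lower]
  induction word.toList using List.reverseRecOn with
  | nil => simp
  | append_singleton cs d _ =>
    have hlast : ((cs ++ [d]).map PySem.Chars.lowerChar).getLast? = some (PySem.Chars.lowerChar d) := by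
      simp
    have hcount : ((cs ++ [d]).map PySem.Chars.lowerChar).countP (fun c => c ∈ pvVowels)
        = (cs ++ [d]).countP (fun d => PySem.Chars.lowerChar d ∈ pvVowels) := by
      rw [List.countP_map]; rfl
    rw [hlast]
    have hsnd := pvSplit_snd_snoc cs d [] []
    have hfst := pvSplit_fst_len (cs ++ [d]) [] []
    by_cases h : PySem.Chars.lowerChar d ∈ pvVowels
    · have h2 : ((cs ++ [d]).foldl pvSplitStep ([], [])).2 = [] := hsnd.mpr h
      simp only [h2, ne_eq, not_true_eq_false, if_false, List.length_map]
      rw [hfst, hcount]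
      simp [h]
    · have h2 : ((cs ++ [d]).foldl pvSplitStep ([], [])).2 ≠ [] := fun he => h (hsnd.mp he)
      simp only [h2, ne_eq, not_false_eq_true, if_true, List.length_map, List.length_append,
        List.length_cons, List.length_nil]
      rw [hfst, hcount]
      simp [h]

-- a first matching suffix exists iff some suffix matches
theorem pvFind_any (lw : String) (es : List String) :
    (es.find? (fun e => PySem.Str.endswith lw e)).isSome
      = es.any (fun e => PySem.Str.endswith lw e) := by
  induction es with
  | nil => rfl
  | cons e es ih =>
    cases h : PySem.Str.endswith lw e <;>
      simp only [List.find?_cons, List.any_cons, h, Option.isSome_some, Bool.true_or,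
        Bool.false_or, ih]

-- ===== VERDICT (by name: the statement is the Claim_ definition above) =====
theorem determine_stress_pattern_spec : Claim_equal_determine_stress_pattern := by
  intro word _
  show determine_stress_pattern word = determine_stress_pattern_alt word
  simp only [determine_stress_pattern, determine_stress_pattern_alt]
  rw [pvCount_eq word]
  cases hb : (["ia", "io", "ie", "ion", "ua", "ue", "uo"].any
      (fun e => PySem.Str.endswith (PySem.Str.lower word) e)) with
  | false =>
    have hf : (["ia", "io", "ie", "ion", "ua", "ue", "uo"].find?
        (fun e => PySem.Str.endswith (PySem.Str.lower word) e)) = none := by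
      have h := pvFind_any (PySem.Str.lower word) ["ia", "io", "ie", "ion", "ua", "ue", "uo"]
      rw [hb] at h
      exact Option.not_isSome_iff_eq_none.mp (by rw [h]; exact Bool.false_ne_true)
    rw [hf]
    simp only [Bool.false_eq_true, and_false, if_false, pvClassifyA]
    split_ifs <;> rfl
  | true =>
    obtain ⟨e, he⟩ : ∃ e, (["ia", "io", "ie", "ion", "ua", "ue", "uo"].find?
        (fun e => PySem.Str.endswith (PySem.Str.lower word) e)) = some e := by
      have h := pvFind_any (PySem.Str.lower word) ["ia", "io", "ie", "ion", "ua", "ue", "uo"]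
      rw [hb] at h
      exact Option.isSome_iff_exists.mp h
    rw [he]
    by_cases h3 : 3 ≤ (match (PySem.Str.lower word).toList.getLast? with
         | some c => if c ∈ pvVowels
             then (PySem.Str.lower word).toList.countP (fun c => c ∈ pvVowels)
             else (PySem.Str.lower word).toList.countP (fun c => c ∈ pvVowels) + 1
         | none => (PySem.Str.lower word).toList.countP (fun c => c ∈ pvVowels))
    · exact (if_pos h3).trans (if_pos ⟨h3, rfl⟩).symm
    · simp only [h3, if_false, and_true, pvClassifyA]
      split_ifs <;> rfl
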